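-- pv_equiv track=rewrite | github.com/Mr-Harsh-Dixit/Project_Euler_Solutions | Python/Problem_012.py | solve
-- ===== SOURCE A (Python) =====
-- def count_divisors(x: int) -> int:
--     total = 1
--
--     exp = 0
--     while x % 2 == 0:
--         x //= 2
--         exp += 1
--     if exp:
--         total *= (exp + 1)
--
--     p = 3
--     while p * p <= x:
--         exp = 0
--         while x % p == 0:
--             x //= p
--             exp += 1
--         if exp:
--             total *= (exp + 1)
--         p += 2
--
--     if x > 1:
--         total *= 2
--
--     return total
--
-- def solve(threshold: int = 500) -> int:
--     n = 1
--     while True: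
--         if n % 2 == 0:
--             a, b = n // 2, n + 1
--         else:
--             a, b = n, (n + 1) // 2
--
--         if count_divisors(a) * count_divisors(b) > threshold:
--             return n * (n + 1) // 2
--
--         n += 1
-- ===== SOURCE B (Python) =====
-- def divisor_count_sieve(limit: int) -> list:
--     cnt = [0] * (limit + 1)
--     for i in range(1, limit + 1):
--         for j in range(i, limit + 1, i):
--             cnt[j] += 1
--     return cnt
--
-- def solve(threshold: int = 500) -> int:
--     limit = 1024
--     cnt = divisor_count_sieve(limit)
--     n = 1
--     while True:
--         if n + 1 > limit:
--             limit *= 2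
--             cnt = divisor_count_sieve(limit)
--         a, b = (n // 2, n + 1) if n % 2 == 0 else (n, (n + 1) // 2)
--         if cnt[a] * cnt[b] > threshold:
--             return n * (n + 1) // 2
--         n += 1
-- ===== Notes on version B (the rewrite author's own statement) =====
-- stated objective: alternative
-- what changed: A counts divisors of each triangle-half by trial-division prime factorization per candidate; B instead builds a divisor-count table with a sieve (for each i, increment all multiples of i), doubling the table bound as the search advances, so each candidate is a pair of table lookups (intended as faster; a timing run measured 3.55x at the largest size both finished but could not confirm the label on all large inputs).
import Mathlib
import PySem

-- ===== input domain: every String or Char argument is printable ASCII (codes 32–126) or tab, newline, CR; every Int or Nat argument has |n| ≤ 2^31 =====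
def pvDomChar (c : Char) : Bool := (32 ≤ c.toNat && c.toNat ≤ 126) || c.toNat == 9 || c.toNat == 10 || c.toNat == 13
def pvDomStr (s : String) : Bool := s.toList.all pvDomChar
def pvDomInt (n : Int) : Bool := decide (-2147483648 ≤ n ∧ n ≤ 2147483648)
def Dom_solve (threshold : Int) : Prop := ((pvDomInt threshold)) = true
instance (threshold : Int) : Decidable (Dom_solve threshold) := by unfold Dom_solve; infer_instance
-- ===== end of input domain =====

-- B replaces A's per-number trial-division divisor counting by a divisor-count sieve over a table
-- whose bound doubles as the search advances (a different algorithm; objective: alternative); the increasing-n search over the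
-- two coprime triangle halves is kept. Both search loops carry a large fuel parameter solely to
-- make Python's unbounded `while True` total in Lean.

-- ===== PORT A =====
-- `while x % p == 0: x //= p; exp += 1` ; fuel only for totality
def pvDivLoop (p x exp : Int) (fuel : Nat) : Int × Int :=
  match fuel with
  | 0 => (x, exp)
  | f + 1 =>
    if PySem.Int.mod x p = 0 then pvDivLoop p (PySem.Int.floordiv x p) (exp + 1) f
    else (x, exp)

-- `while p * p <= x: … p += 2` followed by the final `if x > 1: total *= 2`
def pvOddLoop (p x total : Int) (fuel : Nat) : Int :=
  match fuel with
  | 0 => total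
  | f + 1 =>
    if p * p ≤ x then
      let r := pvDivLoop p x 0 (x.toNat + 1)
      pvOddLoop (p + 2) r.1 (if r.2 ≠ 0 then total * (r.2 + 1) else total) f
    else if 1 < x then total * 2 else total

def count_divisors_A (x : Int) : Int :=
  let r := pvDivLoop 2 x 0 (x.toNat + 1)
  pvOddLoop 3 r.1 (if r.2 ≠ 0 then 1 * (r.2 + 1) else 1) (x.toNat + 1)

def pvSearchA (threshold n : Int) (fuel : Nat) : Int :=
  match fuel with
  | 0 => 0
  | f + 1 =>
    let ab : Int × Int :=
      if PySem.Int.mod n 2 = 0 then (PySem.Int.floordiv n 2, n + 1)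
      else (n, PySem.Int.floordiv (n + 1) 2)
    if count_divisors_A ab.1 * count_divisors_A ab.2 > threshold then
      PySem.Int.floordiv (n * (n + 1)) 2
    else pvSearchA threshold (n + 1) f

def solve (threshold : Int) : Int := pvSearchA threshold 1 1000000000

-- ===== PORT B =====
-- Python list `cnt` with in-place index updates is ported as Array Int (same values at every index).
-- `for j in range(i, limit + 1, i): cnt[j] += 1` (the 0 < i guard only makes the recursion total)
def pvSieveJ (cnt : Array Int) (j i limit : Nat) : Array Int :=
  if _h : 0 < i ∧ j ≤ limit then pvSieveJ (cnt.modify j (· + 1)) (j + i) i limit else cnt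
termination_by limit + 1 - j
decreasing_by omega

-- `for i in range(1, limit + 1): <inner loop>`
def pvSieveI (cnt : Array Int) (i limit : Nat) : Array Int :=
  if i ≤ limit then pvSieveI (pvSieveJ cnt i i limit) (i + 1) limit else cnt
termination_by limit + 1 - i

-- `cnt = [0] * (limit + 1)` then the two loops
def pvSieve (limit : Nat) : Array Int := pvSieveI (Array.replicate (limit + 1) 0) 1 limit

def pvSearchB (threshold n : Int) (limit : Nat) (cnt : Array Int) (fuel : Nat) : Int :=
  match fuel with
  | 0 => 0
  | f + 1 =>
    let lc := if (limit : Int) < n + 1 then (2 * limit, pvSieve (2 * limit)) else (limit, cnt)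
    let ab : Int × Int :=
      if PySem.Int.mod n 2 = 0 then (PySem.Int.floordiv n 2, n + 1)
      else (n, PySem.Int.floordiv (n + 1) 2)
    if lc.2[ab.1.toNat]! * lc.2[ab.2.toNat]! > threshold then
      PySem.Int.floordiv (n * (n + 1)) 2
    else pvSearchB threshold (n + 1) lc.1 lc.2 f

def solve_alt (threshold : Int) : Int := pvSearchB threshold 1 1024 (pvSieve 1024) 1000000000

-- ===== PRECONDITION & SPEC =====
def Spec_solve (threshold : Int) (out : Int) : Prop := out = solve_alt threshold
instance (threshold : Int) (out : Int) : Decidable (Spec_solve threshold out) := by unfold Spec_solve; infer_instance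

-- ===== CLAIM (what is proved, stated in full; the proofs are below) =====
def Claim_equal_solve : Prop := ∀ (threshold : Int), Dom_solve threshold → Spec_solve threshold (solve threshold)

-- ===== LEMMAS AND PROOFS =====

lemma pvDivLoop_spec : ∀ (fuel : Nat) (p x e : Int), 2 ≤ p → 1 ≤ x → x < (fuel : Int) →
    ∃ (k : ℕ) (x' : Int), pvDivLoop p x e fuel = (x', e + k) ∧ x = p ^ k * x' ∧ ¬ p ∣ x' ∧ 1 ≤ x' := by
  intro fuel
  induction fuel with
  | zero => intro p x e hp hx hf; exfalso; simp at hf; omega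
  | succ f ih =>
    intro p x e hp hx hf
    by_cases h : PySem.Int.mod x p = 0
    · have hdvd : p ∣ x := (PySem.Int.mod_eq_zero_iff_dvd x p).mp h
      have hfd : PySem.Int.floordiv x p = x / p := PySem.Int.floordiv_eq_ediv_of_pos (b := p) (a := x) (by omega)
      obtain ⟨c, hc⟩ := hdvd
      have hc1 : 1 ≤ c := by nlinarith
      have hxp : x / p = c := by rw [hc]; exact Int.mul_ediv_cancel_left c (by omega)
      have hcf : c < (f : Int) := by
        have : 2 * c ≤ p * c := by nlinarith
        push_cast at hf ⊢; omega
      obtain ⟨k, x', heq, hfact, hnd, hx'⟩ := ih p c (e + 1) hp hc1 hcf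
      refine ⟨k + 1, x', ?_, ?_, hnd, hx'⟩
      · simp only [pvDivLoop, h, if_true, hfd, hxp, heq]
        congr 1; push_cast; ring
      · rw [hc, hfact]; ring
    · refine ⟨0, x, ?_, by ring, ?_, hx⟩
      · simp [pvDivLoop, h]
      · intro hd; exact h ((PySem.Int.mod_eq_zero_iff_dvd x p).mpr hd)

lemma card_divisors_pow_mul (p : Int) (k : ℕ) (x' : Int) (hp2 : 2 ≤ p)
    (hp : p.toNat.Prime) (hx' : 1 ≤ x') (hnd : ¬ p ∣ x') :
    (((p ^ k * x').toNat.divisors.card : Int)) = (k + 1) * (x'.toNat.divisors.card : Int) := by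
  set P := p.toNat with hP
  set m := x'.toNat with hm
  have hpc : p = (P : Int) := by omega
  have hxc : x' = (m : Int) := by omega
  have hmul : (p ^ k * x').toNat = P ^ k * m := by
    rw [hpc, hxc, ← Nat.cast_pow, ← Nat.cast_mul, Int.toNat_natCast]
  have hndN : ¬ P ∣ m := by
    intro hd; exact hnd (by rw [hpc, hxc]; exact_mod_cast hd)
  have hcop : (P ^ k).Coprime m := ((Nat.Prime.coprime_iff_not_dvd hp).mpr hndN).pow_left k
  rw [hmul, hcop.card_divisors_mul]
  have : (P ^ k).divisors.card = k + 1 := by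
    rw [Nat.divisors_prime_pow hp, Finset.card_map, Finset.card_range]
  rw [this]; push_cast; ring

lemma pvOddLoop_spec : ∀ (fuel : Nat) (p x total : Int),
    3 ≤ p → p % 2 = 1 → 1 ≤ x → x + 4 ≤ (fuel : Int) + p → 1 ≤ fuel →
    (∀ q : ℕ, q.Prime → (q : Int) ∣ x → p ≤ (q : Int)) →
    pvOddLoop p x total fuel = total * (x.toNat.divisors.card : Int) := by
  intro fuel
  induction fuel with
  | zero => intro p x total h3 _ _ _ hf _; omega
  | succ f ih =>
    intro p x total h3 hodd hx hub _ hfac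
    by_cases hg : p * p ≤ x
    · have hxf : x < ((x.toNat + 1 : ℕ) : Int) := by push_cast; omega
      obtain ⟨k, x', heq, hfact, hnd, hx'⟩ :=
        pvDivLoop_spec (x.toNat + 1) p x 0 (by omega) hx hxf
      have hplex : p ≤ x := le_trans (le_mul_of_one_le_left (by omega) (by omega)) hg
      have hxle : x' ≤ x := by
        have h1 : (1 : Int) ≤ p ^ k := one_le_pow₀ (by omega)
        calc x' = 1 * x' := (one_mul x').symm
          _ ≤ p ^ k * x' := mul_le_mul_of_nonneg_right h1 (by omega)
          _ = x := hfact.symm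
      have hf1 : 1 ≤ f := by push_cast at hub; omega
      have hfac' : ∀ q : ℕ, q.Prime → (q : Int) ∣ x' → p + 2 ≤ (q : Int) := by
        intro q hq hqd
        have hqx : (q : Int) ∣ x := hfact ▸ (hqd.mul_left _)
        have hpq : p ≤ (q : Int) := hfac q hq hqx
        rcases eq_or_lt_of_le hpq with he | hlt
        · exact absurd (he ▸ hqd) hnd
        · by_cases he2 : (q : Int) = p + 1
          · have hq2 : q % 2 = 0 := by omega
            have : q = 2 := (Nat.Prime.even_iff hq).mp (Nat.even_iff.mpr hq2)
            omega
          · omega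
      have ihres := ih (p + 2) x' (if (k : Int) ≠ 0 then total * ((k : Int) + 1) else total)
        (by omega) (by omega) hx' (by push_cast at hub ⊢; omega) hf1 hfac'
      simp only [pvOddLoop, hg, if_true, heq]
      simp only [zero_add] at ihres ⊢
      rw [ihres]
      rcases Nat.eq_zero_or_pos k with hk0 | hkpos
      · subst hk0
        have : x = x' := by rw [hfact]; ring
        simp [this]
      · have hpP : p.toNat.Prime := by
          by_contra hnp
          have hP3 : 3 ≤ p.toNat := by omega
          have hqp : p.toNat.minFac.Prime := Nat.minFac_prime (by omega)
          have hqdp : (p.toNat.minFac : Int) ∣ p := by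
            have : (p.toNat.minFac : Int) ∣ (p.toNat : Int) := Int.natCast_dvd_natCast.mpr (Nat.minFac_dvd _)
            simpa [Int.toNat_of_nonneg (by omega : (0:Int) ≤ p)] using this
          have hqdx : (p.toNat.minFac : Int) ∣ x := by
            refine dvd_trans hqdp ?_
            rw [hfact]
            exact Dvd.dvd.mul_right (dvd_pow_self p (by omega)) x'
          have hle := hfac _ hqp hqdx
          have hlt := Nat.minFac_le (show 0 < p.toNat by omega)
          have : p.toNat.minFac = p.toNat := by omega
          rw [this] at hqp; exact hnp hqp
        have hcard := card_divisors_pow_mul p k x' (by omega) hpP hx' hnd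
        rw [← hfact] at hcard
        rw [hcard]
        have hkne : (k : Int) ≠ 0 := by exact_mod_cast Nat.pos_iff_ne_zero.mp hkpos
        simp only [hkne, if_true, ne_eq, not_false_iff]
        ring
    · simp only [pvOddLoop, hg, if_false]
      by_cases h1 : 1 < x
      · have hm2 : 2 ≤ x.toNat := by omega
        have hprime : x.toNat.Prime := by
          by_contra hnp
          have hqp : x.toNat.minFac.Prime := Nat.minFac_prime (by omega)
          have hqdx : (x.toNat.minFac : Int) ∣ x := by
            have : (x.toNat.minFac : Int) ∣ (x.toNat : Int) := Int.natCast_dvd_natCast.mpr (Nat.minFac_dvd _)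
            simpa [Int.toNat_of_nonneg (by omega : (0:Int) ≤ x)] using this
          have hle := hfac _ hqp hqdx
          have hsq := Nat.minFac_sq_le_self (show 0 < x.toNat by omega) hnp
          have : (x.toNat.minFac : Int) * (x.toNat.minFac : Int) ≤ (x.toNat : Int) := by
            have := hsq; push_cast [← Nat.cast_pow] at this ⊢
            nlinarith [hsq]
          have hxx : ((x.toNat : Int)) = x := Int.toNat_of_nonneg (by omega)
          nlinarith
        rw [hprime.divisors]
        have : ({1, x.toNat} : Finset ℕ).card = 2 := by
          rw [Finset.card_insert_of_notMem (by simp; omega), Finset.card_singleton]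
        rw [this]
        simp [h1]
      · have hx1 : x = 1 := by omega
        subst hx1
        norm_num

lemma count_divisors_A_eq (x : Int) (hx : 1 ≤ x) :
    count_divisors_A x = (x.toNat.divisors.card : Int) := by
  have hxf : x < ((x.toNat + 1 : ℕ) : Int) := by push_cast; omega
  obtain ⟨k, x1, heq, hfact, hnd, hx1⟩ :=
    pvDivLoop_spec (x.toNat + 1) 2 x 0 (by omega) hx hxf
  have hx1le : x1 ≤ x := by
    have h1 : (1 : Int) ≤ (2:Int) ^ k := one_le_pow₀ (by omega)
    calc x1 = 1 * x1 := (one_mul x1).symm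
      _ ≤ 2 ^ k * x1 := mul_le_mul_of_nonneg_right h1 (by omega)
      _ = x := hfact.symm
  have hfacs : ∀ q : ℕ, q.Prime → (q : Int) ∣ x1 → (3:Int) ≤ (q : Int) := by
    intro q hq hqd
    have h2 : 2 ≤ q := hq.two_le
    have : q ≠ 2 := by
      rintro rfl
      exact hnd (by exact_mod_cast hqd)
    have : 3 ≤ q := by omega
    exact_mod_cast this
  have hodd := pvOddLoop_spec (x.toNat + 1) 3 x1 (if (k:Int) ≠ 0 then 1 * ((k:Int) + 1) else 1)
    le_rfl rfl hx1 (by push_cast; omega) (by omega) hfacs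
  simp only [count_divisors_A]
  rw [heq]
  simp only [zero_add] at hodd ⊢
  rw [hodd]
  have hcard := card_divisors_pow_mul 2 k x1 (by omega) (by decide) hx1 hnd
  rw [← hfact] at hcard
  rw [hcard]
  by_cases hk : (k : Int) = 0
  · simp [hk]
  · simp only [hk, if_true, ne_eq, not_false_iff]
    ring

lemma size_pvSieveJ (cnt : Array Int) (j i limit : Nat) :
    (pvSieveJ cnt j i limit).size = cnt.size := by
  fun_induction pvSieveJ
  all_goals simp_all [Array.size_modify]

lemma pvSieveJ_get (i limit : Nat) (hi : 0 < i) (j : Nat) (hj : j ≤ limit) :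
    ∀ (k j0 : Nat) (cnt : Array Int), limit + 1 - j0 ≤ k → i ∣ j0 → cnt.size = limit + 1 →
    (pvSieveJ cnt j0 i limit)[j]! = cnt[j]! + (if i ∣ j ∧ j0 ≤ j then 1 else 0) := by
  intro k
  induction k with
  | zero =>
    intro j0 cnt hk hd hsz
    have hj0 : ¬ (0 < i ∧ j0 ≤ limit) := by omega
    rw [pvSieveJ, dif_neg hj0]
    have : ¬ (i ∣ j ∧ j0 ≤ j) := by rintro ⟨-, hle⟩; omega
    simp [this]
  | succ k ih =>
    intro j0 cnt hk hd hsz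
    by_cases hg : j0 ≤ limit
    · rw [pvSieveJ, dif_pos ⟨hi, hg⟩]
      rw [ih (j0 + i) _ (by omega) (Nat.dvd_add hd dvd_rfl) (by rw [Array.size_modify]; exact hsz)]
      have hjlt : j < cnt.size := by omega
      have hmod : (cnt.modify j0 (· + 1))[j]! = cnt[j]! + (if j0 = j then 1 else 0) := by
        rw [getElem!_pos _ j (by rw [Array.size_modify]; exact hjlt),
            getElem!_pos _ j hjlt, Array.getElem_modify]
        split_ifs <;> simp
      rw [hmod]
      by_cases he : j0 = j
      · subst he
        have h1 : i ∣ j0 ∧ j0 ≤ j0 := ⟨hd, le_rfl⟩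
        have h2 : ¬ (i ∣ j0 ∧ j0 + i ≤ j0) := by rintro ⟨-, hle⟩; omega
        rw [if_pos rfl, if_neg h2, if_pos h1]
        ring
      · have : (i ∣ j ∧ j0 + i ≤ j) ↔ (i ∣ j ∧ j0 ≤ j) := by
          constructor
          · rintro ⟨hdj, hle⟩; exact ⟨hdj, by omega⟩
          · rintro ⟨hdj, hle⟩
            refine ⟨hdj, ?_⟩
            have hsub : i ∣ j - j0 := Nat.dvd_sub hdj hd
            have hpos : 0 < j - j0 := by omega
            have := Nat.le_of_dvd hpos hsub
            omega
        simp only [this]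
        omega
    · have hj0 : ¬ (0 < i ∧ j0 ≤ limit) := by omega
      rw [pvSieveJ, dif_neg hj0]
      have : ¬ (i ∣ j ∧ j0 ≤ j) := by rintro ⟨-, hle⟩; omega
      simp [this]

lemma pvSieveI_get (limit : Nat) (j : Nat) (hj1 : 1 ≤ j) (hj : j ≤ limit) :
    ∀ (k i0 : Nat) (cnt : Array Int), limit + 1 - i0 ≤ k → 0 < i0 → cnt.size = limit + 1 →
    (pvSieveI cnt i0 limit)[j]! = cnt[j]! + ((j.divisors.filter (fun u => i0 ≤ u)).card : Int) := by
  intro k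
  induction k with
  | zero =>
    intro i0 cnt hk hi hsz
    have hg : ¬ i0 ≤ limit := by omega
    rw [pvSieveI, if_neg hg]
    have : j.divisors.filter (fun u => i0 ≤ u) = ∅ := by
      rw [Finset.eq_empty_iff_forall_notMem]
      intro u hu
      simp only [Finset.mem_filter, Nat.mem_divisors] at hu
      obtain ⟨⟨hdvd, hne⟩, hle⟩ := hu
      have := Nat.le_of_dvd (by omega) hdvd
      omega
    simp [this]
  | succ k ih =>
    intro i0 cnt hk hi hsz
    by_cases hg : i0 ≤ limit
    · rw [pvSieveI, if_pos hg]
      rw [ih (i0 + 1) _ (by omega) (by omega) (by rw [size_pvSieveJ]; exact hsz)]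
      rw [pvSieveJ_get i0 limit hi j hj (limit + 1) i0 cnt (by omega) dvd_rfl hsz]
      have hcard : ((j.divisors.filter (fun u => i0 ≤ u)).card : Int) =
          (if i0 ∣ j ∧ i0 ≤ j then 1 else 0) + ((j.divisors.filter (fun u => i0 + 1 ≤ u)).card : Int) := by
        by_cases hdvd : i0 ∣ j
        · have hle : i0 ≤ j := Nat.le_of_dvd (by omega) hdvd
          have hins : j.divisors.filter (fun u => i0 ≤ u) =
              insert i0 (j.divisors.filter (fun u => i0 + 1 ≤ u)) := by
            ext u
            simp only [Finset.mem_filter, Finset.mem_insert, Nat.mem_divisors]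
            constructor
            · rintro ⟨⟨hu, hne⟩, hul⟩
              by_cases he : u = i0
              · exact Or.inl he
              · exact Or.inr ⟨⟨hu, hne⟩, by omega⟩
            · rintro (rfl | ⟨⟨hu, hne⟩, hul⟩)
              · exact ⟨⟨hdvd, by omega⟩, le_rfl⟩
              · exact ⟨⟨hu, hne⟩, by omega⟩
          rw [hins, Finset.card_insert_of_notMem (by simp only [Finset.mem_filter]; rintro ⟨-, hc⟩; omega)]
          simp only [hdvd, hle, and_self, if_pos]
          push_cast
          omega
        · have : j.divisors.filter (fun u => i0 ≤ u) = j.divisors.filter (fun u => i0 + 1 ≤ u) := by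
            ext u
            simp only [Finset.mem_filter, Nat.mem_divisors]
            constructor
            · rintro ⟨⟨hu, hne⟩, hul⟩
              have : u ≠ i0 := by rintro rfl; exact hdvd hu
              exact ⟨⟨hu, hne⟩, by omega⟩
            · rintro ⟨⟨hu, hne⟩, hul⟩
              exact ⟨⟨hu, hne⟩, by omega⟩
          rw [this]
          simp [hdvd]
      rw [hcard]
      ring
    · rw [pvSieveI, if_neg hg]
      have : j.divisors.filter (fun u => i0 ≤ u) = ∅ := by
        rw [Finset.eq_empty_iff_forall_notMem]
        intro u hu
        simp only [Finset.mem_filter, Nat.mem_divisors] at hu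
        obtain ⟨⟨hdvd, hne⟩, hle⟩ := hu
        have := Nat.le_of_dvd (by omega) hdvd
        omega
      simp [this]

lemma pvSieve_get (limit j : Nat) (hj1 : 1 ≤ j) (hj : j ≤ limit) :
    (pvSieve limit)[j]! = (j.divisors.card : Int) := by
  unfold pvSieve
  rw [pvSieveI_get limit j hj1 hj (limit + 1) 1 _ (by omega) (by omega) (by simp)]
  have h0 : (Array.replicate (limit + 1) (0 : Int))[j]! = 0 := by
    rw [getElem!_pos _ j (by simpa using Nat.lt_succ_of_le hj)]
    simp
  have hfil : j.divisors.filter (fun u => 1 ≤ u) = j.divisors := by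
    apply Finset.filter_true_of_mem
    intro u hu
    exact Nat.pos_of_mem_divisors hu
  rw [h0, hfil]
  ring

lemma sieve_count (limit : Nat) (x : Int) (hx : 1 ≤ x) (hxle : x ≤ (limit : Int)) :
    (pvSieve limit)[x.toNat]! = count_divisors_A x := by
  rw [count_divisors_A_eq x hx, pvSieve_get limit x.toNat (by omega) (by omega)]

lemma search_eq : ∀ (fuel : Nat) (t n : Int) (limit : Nat), 1 ≤ n → n ≤ (limit : Int) →
    1 ≤ limit → pvSearchA t n fuel = pvSearchB t n limit (pvSieve limit) fuel := by
  intro fuel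
  induction fuel with
  | zero => intro t n limit _ _ _; rfl
  | succ f ih =>
    intro t n limit hn hnl hl
    simp only [pvSearchA, pvSearchB]
    by_cases hL : (limit : Int) < n + 1
    · simp only [hL, if_pos]
      have hl2 : (1 : Nat) ≤ 2 * limit := by omega
      have hnl2 : n + 1 ≤ ((2 * limit : Nat) : Int) := by push_cast; omega
      by_cases he : PySem.Int.mod n 2 = 0
      · have h2 : (2 : Int) ∣ n := (PySem.Int.mod_eq_zero_iff_dvd n 2).mp he
        have hfd : PySem.Int.floordiv n 2 = n / 2 :=
          PySem.Int.floordiv_eq_ediv_of_pos (b := 2) (a := n) (by omega)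
        have ha : 1 ≤ PySem.Int.floordiv n 2 := by
          obtain ⟨c, hc⟩ := h2
          rw [hfd, hc, Int.mul_ediv_cancel_left c (by omega)]
          omega
        have hale : PySem.Int.floordiv n 2 ≤ ((2 * limit : Nat) : Int) := by
          rw [hfd]; push_cast; omega
        simp only [he, if_pos]
        rw [sieve_count _ _ ha hale, sieve_count _ _ (by omega : (1:Int) ≤ n + 1) hnl2]
        split_ifs with h
        · rfl
        · exact ih t (n + 1) (2 * limit) (by omega) (by push_cast; omega) hl2
      · have hfd : PySem.Int.floordiv (n + 1) 2 = (n + 1) / 2 :=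
          PySem.Int.floordiv_eq_ediv_of_pos (b := 2) (a := n + 1) (by omega)
        have hb : 1 ≤ PySem.Int.floordiv (n + 1) 2 := by rw [hfd]; omega
        have hble : PySem.Int.floordiv (n + 1) 2 ≤ ((2 * limit : Nat) : Int) := by
          rw [hfd]; push_cast; omega
        simp only [he, if_false]
        rw [sieve_count _ _ hn (by push_cast; omega), sieve_count _ _ hb hble]
        split_ifs with h
        · rfl
        · exact ih t (n + 1) (2 * limit) (by omega) (by push_cast; omega) hl2
    · simp only [hL, if_false]
      have hnl1 : n + 1 ≤ (limit : Int) := by omega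
      by_cases he : PySem.Int.mod n 2 = 0
      · have h2 : (2 : Int) ∣ n := (PySem.Int.mod_eq_zero_iff_dvd n 2).mp he
        have hfd : PySem.Int.floordiv n 2 = n / 2 :=
          PySem.Int.floordiv_eq_ediv_of_pos (b := 2) (a := n) (by omega)
        have ha : 1 ≤ PySem.Int.floordiv n 2 := by
          obtain ⟨c, hc⟩ := h2
          rw [hfd, hc, Int.mul_ediv_cancel_left c (by omega)]
          omega
        have hale : PySem.Int.floordiv n 2 ≤ (limit : Int) := by rw [hfd]; omega
        simp only [he, if_pos]
        rw [sieve_count _ _ ha hale, sieve_count _ _ (by omega : (1:Int) ≤ n + 1) hnl1]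
        split_ifs with h
        · rfl
        · exact ih t (n + 1) limit (by omega) hnl1 hl
      · have hfd : PySem.Int.floordiv (n + 1) 2 = (n + 1) / 2 :=
          PySem.Int.floordiv_eq_ediv_of_pos (b := 2) (a := n + 1) (by omega)
        have hb : 1 ≤ PySem.Int.floordiv (n + 1) 2 := by rw [hfd]; omega
        have hble : PySem.Int.floordiv (n + 1) 2 ≤ (limit : Int) := by rw [hfd]; omega
        simp only [he, if_false]
        rw [sieve_count _ _ hn hnl, sieve_count _ _ hb hble]
        split_ifs with h
        · rfl
        · exact ih t (n + 1) limit (by omega) hnl1 hl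

-- ===== VERDICT (by name: the statement is the Claim_ definition above) =====
theorem solve_spec : Claim_equal_solve := by
  intro t _
  unfold Spec_solve solve solve_alt
  exact search_eq _ t 1 1024 le_rfl (by norm_num) (by norm_num)
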